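-- pv_equiv track=rewrite | github.com/Giangkhamliu/hackathondaily | sum_of_remainder.py | FindSumOfRemainders
-- ===== SOURCE A (Python) =====
-- def FindSumOfRemainders(n, div):
--     s=0
--     i=1
--     while i<=n:
--         if i<div:
--             s+=i
--         else:
--             a=i%div
--             s+=a
--         i+=1
--     return s
-- ===== SOURCE B (Python) =====
-- def FindSumOfRemainders(n, div):
--     # Closed form: remainders of 1..n mod div are periodic with period |div|;
--     # sum = (full cycles) * (cycle sum) + (partial cycle), O(1) instead of O(n).
--     if n <= 0:
--         return 0
--     d = abs(div)
--     q, r = divmod(n, d)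
--     s = q * (d * (d - 1) // 2) + r * (r + 1) // 2
--     if div < 0:
--         s += div * (n - q)
--     return s
-- ===== Notes on version B (the rewrite author's own statement) =====
-- stated objective: faster
-- what changed: Replaced the O(n) accumulation loop by an O(1) closed form using periodicity of remainders: full-cycle count times cycle sum plus the triangular partial-cycle sum, with a linear correction for negative divisors.
import Mathlib
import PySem

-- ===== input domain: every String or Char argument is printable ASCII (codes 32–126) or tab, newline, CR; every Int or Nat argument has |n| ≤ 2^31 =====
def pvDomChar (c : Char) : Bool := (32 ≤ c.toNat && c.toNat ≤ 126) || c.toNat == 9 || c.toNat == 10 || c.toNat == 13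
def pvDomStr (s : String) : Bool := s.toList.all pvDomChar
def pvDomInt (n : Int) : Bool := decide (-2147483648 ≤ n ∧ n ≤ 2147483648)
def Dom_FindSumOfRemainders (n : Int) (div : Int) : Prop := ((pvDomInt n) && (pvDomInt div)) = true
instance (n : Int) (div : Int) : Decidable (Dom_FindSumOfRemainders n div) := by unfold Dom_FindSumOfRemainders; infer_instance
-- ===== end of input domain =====

-- B replaces A's O(n) remainder-accumulation loop by an O(1) closed form (full cycles + partial cycle).

-- ===== PORT A =====
-- the while loop of A: state (s, i), one fuel unit per iteration
def pvLoopA (n div : Int) (s i : Int) : Nat → Int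
  | 0 => s
  | fuel + 1 =>
    if i ≤ n then
      pvLoopA n div (if i < div then s + i else s + PySem.Int.mod i div) (i + 1) fuel
    else s

def FindSumOfRemainders (n : Int) (div : Int) : Int :=
  pvLoopA n div 0 1 n.toNat

-- ===== PORT B =====
def FindSumOfRemainders_alt (n : Int) (div : Int) : Int :=
  if n ≤ 0 then 0
  else
    let d := |div|
    let q := PySem.Int.floordiv n d
    let r := PySem.Int.mod n d
    let s := q * PySem.Int.floordiv (d * (d - 1)) 2 + PySem.Int.floordiv (r * (r + 1)) 2
    if div < 0 then s + div * (n - q) else s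

-- ===== PRECONDITION & SPEC =====
-- Pre_ excludes exactly the inputs (n ≥ 1 with div = 0) on which Python A raises ZeroDivisionError.
def Pre_FindSumOfRemainders (n : Int) (div : Int) : Prop := n ≤ 0 ∨ div ≠ 0
instance (n : Int) (div : Int) : Decidable (Pre_FindSumOfRemainders n div) := by unfold Pre_FindSumOfRemainders; infer_instance

def pvWitness_FindSumOfRemainders : Int × Int := (10, 3)

def Spec_FindSumOfRemainders (n : Int) (div : Int) (out : Int) : Prop := out = FindSumOfRemainders_alt n div
instance (n : Int) (div : Int) (out : Int) : Decidable (Spec_FindSumOfRemainders n div out) := by unfold Spec_FindSumOfRemainders; infer_instance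

-- ===== CLAIM (what is proved, stated in full; the proofs are below) =====
def Claim_equal_FindSumOfRemainders : Prop := ∀ (n : Int) (div : Int), Dom_FindSumOfRemainders n div → Pre_FindSumOfRemainders n div → Spec_FindSumOfRemainders n div (FindSumOfRemainders n div)

-- ===== LEMMAS AND PROOFS =====

-- sum of PySem.Int.mod j div for j = i, i+1, …, i+fuel-1
def pvTail (div i : Int) : Nat → Int
  | 0 => 0
  | fuel + 1 => PySem.Int.mod i div + pvTail div (i + 1) fuel

lemma mod_self_of_lt (i div : Int) (h0 : 0 ≤ i) (h1 : i < div) : PySem.Int.mod i div = i := by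
  have hq : PySem.Int.floordiv i div = 0 := by
    rw [PySem.Int.floordiv_eq_iff_of_pos (by omega)]
    constructor <;> nlinarith
  have := PySem.Int.floordiv_mul_add_mod i div
  rw [hq] at this; omega

lemma pvLoopA_eq_tail (n div : Int) :
    ∀ (fuel : Nat) (s i : Int), 1 ≤ i → i + fuel = n + 1 →
      pvLoopA n div s i fuel = s + pvTail div i fuel := by
  intro fuel
  induction fuel with
  | zero => intro s i _ _; simp [pvLoopA, pvTail]
  | succ f ih =>
    intro s i hi hfe
    have hle : i ≤ n := by omega
    rw [pvLoopA, if_pos hle, pvTail, ih _ (i + 1) (by omega) (by omega)]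
    by_cases hlt : i < div
    · rw [if_pos hlt, mod_self_of_lt i div (by omega) hlt]; ring
    · rw [if_neg hlt]; ring

lemma pvTail_succ_right (div : Int) :
    ∀ (fuel : Nat) (i : Int), pvTail div i (fuel + 1) = pvTail div i fuel + PySem.Int.mod (i + fuel) div := by
  intro fuel
  induction fuel with
  | zero => intro i; simp [pvTail]
  | succ f ih =>
    intro i
    rw [pvTail, ih (i + 1), pvTail,
        show i + ((f : Nat) + 1 : Nat) = i + 1 + (f : Int) by push_cast; ring]
    ring

-- uniqueness of Python's mod for a negative divisor
lemma mod_unique_neg (a b k v : Int) (hb : b < 0) (h : a = k * b + v) (h1 : b < v) (h2 : v ≤ 0) :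
    PySem.Int.mod a b = v := by
  have hm := PySem.Int.floordiv_mul_add_mod a b
  have hbd := PySem.Int.mod_neg_bounds (a := a) hb
  set q0 := PySem.Int.floordiv a b with hq0
  set r0 := PySem.Int.mod a b with hr0
  have key : (q0 - k) * b = v - r0 := by linarith [hm]
  rcases lt_trichotomy (q0 - k) 0 with hlt | heq | hgt
  · have hx := mul_nonneg (by omega : (0:Int) ≤ -(q0 - k + 1)) (by omega : (0:Int) ≤ -b)
    nlinarith
  · rw [heq, zero_mul] at key; omega
  · have hx := mul_nonneg (by omega : (0:Int) ≤ q0 - k - 1) (by omega : (0:Int) ≤ -b)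
    nlinarith

-- the closed form of B, spelled out (valid for all 0 ≤ m once div ≠ 0)
lemma alt_closed (m div : Int) (hm : 0 ≤ m) (hdiv : div ≠ 0) :
    FindSumOfRemainders_alt m div =
      PySem.Int.floordiv m |div| * PySem.Int.floordiv (|div| * (|div| - 1)) 2 +
      PySem.Int.floordiv (PySem.Int.mod m |div| * (PySem.Int.mod m |div| + 1)) 2 +
      (if div < 0 then div * (m - PySem.Int.floordiv m |div|) else 0) := by
  by_cases h0 : m ≤ 0
  · have hm0 : m = 0 := le_antisymm h0 hm
    subst hm0
    have hd : (0:Int) < |div| := abs_pos.mpr hdiv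
    have hq : PySem.Int.floordiv 0 |div| = 0 := by
      rw [PySem.Int.floordiv_eq_iff_of_pos hd]; constructor <;> nlinarith
    have hr : PySem.Int.mod 0 |div| = 0 := by
      have := PySem.Int.floordiv_mul_add_mod 0 |div|
      rw [hq] at this; omega
    simp [FindSumOfRemainders_alt, hr, PySem.Int.floordiv]
  · rw [FindSumOfRemainders_alt]
    rw [if_neg h0]
    by_cases hneg : div < 0
    · simp only [if_pos hneg]
    · simp only [if_neg hneg]; ring

-- one more term: the closed form satisfies the same recurrence as the sum
lemma alt_step (m div : Int) (hm : 0 ≤ m) (hdiv : div ≠ 0) :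
    FindSumOfRemainders_alt (m + 1) div = FindSumOfRemainders_alt m div + PySem.Int.mod (m + 1) div := by
  have hd : (0:Int) < |div| := abs_pos.mpr hdiv
  set d := |div| with hdd
  set q := PySem.Int.floordiv m d with hq
  set r := PySem.Int.mod m d with hr
  have hqr : q * d + r = m := PySem.Int.floordiv_mul_add_mod m d
  have hr0 : 0 ≤ r := PySem.Int.mod_nonneg (a := m) hd
  have hr1 : r < d := PySem.Int.mod_lt (a := m) hd
  have h2 : (0:Int) < 2 := by norm_num
  by_cases hcase : r + 1 < d
  · -- partial cycle grows by one element
    have hq' : PySem.Int.floordiv (m + 1) d = q := by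
      rw [PySem.Int.floordiv_eq_iff_of_pos hd]; constructor <;> nlinarith
    have hr' : PySem.Int.mod (m + 1) d = r + 1 := by
      have := PySem.Int.floordiv_mul_add_mod (m + 1) d
      rw [hq'] at this; omega
    have htri : PySem.Int.floordiv ((r + 1) * (r + 1 + 1)) 2 =
        PySem.Int.floordiv (r * (r + 1)) 2 + (r + 1) := by
      rw [PySem.Int.floordiv_eq_ediv_of_pos h2, PySem.Int.floordiv_eq_ediv_of_pos h2]
      rw [show (r + 1) * (r + 1 + 1) = r * (r + 1) + (r + 1) * 2 by ring]
      rw [Int.add_mul_ediv_right _ _ (by norm_num : (2:Int) ≠ 0)]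
    have hmod : PySem.Int.mod (m + 1) div = if div < 0 then r + 1 + div else r + 1 := by
      by_cases hneg : div < 0
      · rw [if_pos hneg]
        have hdneg : d = -div := abs_of_neg hneg
        refine mod_unique_neg (m + 1) div (-(q + 1)) (r + 1 + div) hneg ?_ (by omega) (by omega)
        rw [show -(q + 1) * div = (q + 1) * (-div) by ring, ← hdneg]
        nlinarith
      · rw [if_neg hneg]
        have : d = div := abs_of_nonneg (by omega)
        rw [← this]; exact hr'
    rw [alt_closed (m + 1) div (by omega) hdiv, alt_closed m div hm hdiv, hq', hr', htri, hmod]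
    by_cases hneg : div < 0
    · simp only [if_pos hneg]; ring
    · simp only [if_neg hneg]; ring
  · -- completes a cycle: r = d - 1
    have hrd : r = d - 1 := by omega
    have hq' : PySem.Int.floordiv (m + 1) d = q + 1 := by
      rw [PySem.Int.floordiv_eq_iff_of_pos hd]; constructor <;> nlinarith
    have hr' : PySem.Int.mod (m + 1) d = 0 := by
      have := PySem.Int.floordiv_mul_add_mod (m + 1) d
      rw [hq'] at this; nlinarith
    have hmod : PySem.Int.mod (m + 1) div = 0 := by
      by_cases hneg : div < 0
      · have hdneg : d = -div := abs_of_neg hneg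
        refine mod_unique_neg (m + 1) div (-(q + 1)) 0 hneg ?_ (by omega) (by omega)
        rw [show -(q + 1) * div + 0 = (q + 1) * (-div) by ring, ← hdneg]
        nlinarith
      · have : d = div := abs_of_nonneg (by omega)
        rw [← this]; exact hr'
    have htri0 : PySem.Int.floordiv ((0:Int) * (0 + 1)) 2 = 0 := by
      rw [PySem.Int.floordiv_eq_ediv_of_pos h2]; norm_num
    have htrir : PySem.Int.floordiv (r * (r + 1)) 2 = PySem.Int.floordiv (d * (d - 1)) 2 := by
      rw [hrd, show (d - 1) * (d - 1 + 1) = d * (d - 1) by ring]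
    rw [alt_closed (m + 1) div (by omega) hdiv, alt_closed m div hm hdiv, hq', hr', hmod, htri0, htrir]
    by_cases hneg : div < 0
    · simp only [if_pos hneg]; ring
    · simp only [if_neg hneg]; ring

lemma tail_eq_alt (div : Int) (hdiv : div ≠ 0) :
    ∀ (m : Nat), pvTail div 1 m = FindSumOfRemainders_alt m div := by
  intro m
  induction m with
  | zero => simp [pvTail, FindSumOfRemainders_alt]
  | succ k ih =>
    have hstep := alt_step (k : Int) div (by positivity) hdiv
    rw [pvTail_succ_right, ih, show (1:Int) + (k:Int) = (k:Int) + 1 by ring]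
    push_cast
    exact hstep.symm

-- ===== VERDICT (by name: the statement is the Claim_ definition above) =====
theorem FindSumOfRemainders_spec : Claim_equal_FindSumOfRemainders := by
  intro n div _ hpre
  unfold Spec_FindSumOfRemainders FindSumOfRemainders
  by_cases hn : n ≤ 0
  · have h0 : n.toNat = 0 := Int.toNat_of_nonpos hn
    rw [h0]
    simp [pvLoopA, FindSumOfRemainders_alt, hn]
  · have hdiv : div ≠ 0 := hpre.resolve_left hn
    have hn0 : 0 ≤ n := by omega
    have hcast : (n.toNat : Int) = n := Int.toNat_of_nonneg hn0
    rw [pvLoopA_eq_tail n div n.toNat 0 1 (by omega) (by omega), zero_add,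
        tail_eq_alt div hdiv, hcast]
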